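-- pv_equiv track=rewrite | github.com/ManveerAnand/StreakForge | src/leetcode_api.py | get_python3_snippet
-- ===== SOURCE A (Python) =====
-- def get_python3_snippet(code_snippets: list[dict]) -> str:
--     """Extract the Python3 code snippet from the list of code snippets."""
--     for snippet in code_snippets:
--         if snippet.get("langSlug") == "python3":
--             return snippet["code"]
--     # Fallback: try python
--     for snippet in code_snippets:
--         if snippet.get("langSlug") == "python":
--             return snippet["code"]
--     return ""
-- ===== SOURCE B (Python) =====
-- def get_python3_snippet(code_snippets: list[dict]) -> str:
--     """Extract the Python3 code snippet from the list of code snippets."""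
--     fallback = None
--     for snippet in code_snippets:
--         slug = snippet.get("langSlug")
--         if slug == "python3":
--             return snippet["code"]
--         if slug == "python" and fallback is None:
--             fallback = snippet
--     if fallback is not None:
--         return fallback["code"]
--     return ""
-- ===== Notes on version B (the rewrite author's own statement) =====
-- stated objective: simpler
-- what changed: Replaces A's two sequential scans (one for python3, then a second full scan for the python fallback) with a single pass that returns immediately on python3 and records the first python snippet in a fallback variable.
import Mathlib
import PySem

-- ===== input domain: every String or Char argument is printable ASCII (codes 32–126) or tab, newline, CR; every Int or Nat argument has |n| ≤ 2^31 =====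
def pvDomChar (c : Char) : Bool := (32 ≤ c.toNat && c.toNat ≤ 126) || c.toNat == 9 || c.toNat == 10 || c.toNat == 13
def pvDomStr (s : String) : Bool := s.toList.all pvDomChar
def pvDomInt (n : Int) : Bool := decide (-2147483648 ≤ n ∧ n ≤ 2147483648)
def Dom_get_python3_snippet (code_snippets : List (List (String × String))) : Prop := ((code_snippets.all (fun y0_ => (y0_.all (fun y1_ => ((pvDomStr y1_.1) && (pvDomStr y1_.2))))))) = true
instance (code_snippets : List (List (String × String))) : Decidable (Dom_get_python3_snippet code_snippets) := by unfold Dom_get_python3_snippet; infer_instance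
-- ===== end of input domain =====

-- B replaces A's two sequential scans by a single pass with a first-`python` fallback accumulator (objective: simpler).

-- ===== PORT A =====
-- first loop: scan for langSlug == "python3"; when it runs out, fall back to the second loop over the whole list
-- snippet["code"] is a KeyError when absent: Pre_ guarantees .get? "code" is some, so getD "" is exact there
def pvA_loop2 : List (List (String × String)) → String
  | [] => ""
  | s :: rest =>
      if (PySem.Dict.mk s).get? "langSlug" == some "python" then
        ((PySem.Dict.mk s).get? "code").getD ""
      else pvA_loop2 rest

def pvA_loop1 (all : List (List (String × String))) : List (List (String × String)) → String
  | [] => pvA_loop2 all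
  | s :: rest =>
      if (PySem.Dict.mk s).get? "langSlug" == some "python3" then
        ((PySem.Dict.mk s).get? "code").getD ""
      else pvA_loop1 all rest

def get_python3_snippet (code_snippets : List (List (String × String))) : String :=
  pvA_loop1 code_snippets code_snippets

-- ===== PORT B =====
-- single pass; fb holds the first snippet seen with langSlug == "python"
def pvB_loop : List (List (String × String)) → Option (List (String × String)) → String
  | [], fb =>
      match fb with
      | some s => ((PySem.Dict.mk s).get? "code").getD ""
      | none => ""
  | s :: rest, fb =>
      let slug := (PySem.Dict.mk s).get? "langSlug"
      if slug == some "python3" then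
        ((PySem.Dict.mk s).get? "code").getD ""
      else if slug == some "python" && fb.isNone then
        pvB_loop rest (some s)
      else
        pvB_loop rest fb

def get_python3_snippet_alt (code_snippets : List (List (String × String))) : String :=
  pvB_loop code_snippets none

-- ===== PRECONDITION & SPEC =====
-- Pre_ excludes exactly the inputs where Python A raises KeyError: the snippet A would return
-- (the first "python3" one, else the first "python" one) lacks the "code" key.
def pvPreCheck (cs : List (List (String × String))) : Bool :=
  match cs.find? (fun s => (PySem.Dict.mk s).get? "langSlug" == some "python3") with
  | some s => ((PySem.Dict.mk s).get? "code").isSome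
  | none =>
      match cs.find? (fun s => (PySem.Dict.mk s).get? "langSlug" == some "python") with
      | some s => ((PySem.Dict.mk s).get? "code").isSome
      | none => true

def Pre_get_python3_snippet (code_snippets : List (List (String × String))) : Prop :=
  pvPreCheck code_snippets = true
instance (code_snippets : List (List (String × String))) : Decidable (Pre_get_python3_snippet code_snippets) := by
  unfold Pre_get_python3_snippet; infer_instance

def pvWitness_get_python3_snippet : (List (List (String × String))) :=
  [[("langSlug", "java"), ("code", "x")], [("langSlug", "python3"), ("code", "print()")]]

def Spec_get_python3_snippet (code_snippets : List (List (String × String))) (out : String) : Prop := out = get_python3_snippet_alt code_snippets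
instance (code_snippets : List (List (String × String))) (out : String) : Decidable (Spec_get_python3_snippet code_snippets out) := by unfold Spec_get_python3_snippet; infer_instance

-- ===== CLAIM (what is proved, stated in full; the proofs are below) =====
def Claim_equal_get_python3_snippet : Prop := ∀ (code_snippets : List (List (String × String))), Dom_get_python3_snippet code_snippets → Pre_get_python3_snippet code_snippets → Spec_get_python3_snippet code_snippets (get_python3_snippet code_snippets)

-- ===== LEMMAS AND PROOFS =====

-- abbreviation used only in the proofs below
def pvCodeOf (s : List (String × String)) : String := ((PySem.Dict.mk s).get? "code").getD ""

def pvFirstPy3 (xs : List (List (String × String))) : Option (List (String × String)) :=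
  xs.find? (fun s => (PySem.Dict.mk s).get? "langSlug" == some "python3")

theorem pvA_loop1_eq (all xs : List (List (String × String))) :
    pvA_loop1 all xs = match pvFirstPy3 xs with
      | some t => pvCodeOf t
      | none => pvA_loop2 all := by
  induction xs with
  | nil => simp [pvA_loop1, pvFirstPy3]
  | cons s rest ih =>
      by_cases h : ((PySem.Dict.mk s).get? "langSlug" == some "python3") = true
      · simp [pvA_loop1, pvFirstPy3, h, pvCodeOf]
      · simp only [Bool.not_eq_true] at h
        simp [pvA_loop1, pvFirstPy3, h] at ih ⊢
        exact ih

theorem pvB_loop_some (xs : List (List (String × String))) (s : List (String × String)) :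
    pvB_loop xs (some s) = match pvFirstPy3 xs with
      | some t => pvCodeOf t
      | none => pvCodeOf s := by
  induction xs with
  | nil => simp [pvB_loop, pvFirstPy3, pvCodeOf]
  | cons t rest ih =>
      by_cases h : ((PySem.Dict.mk t).get? "langSlug" == some "python3") = true
      · simp [pvB_loop, pvFirstPy3, h, pvCodeOf]
      · simp only [Bool.not_eq_true] at h
        simp [pvB_loop, pvFirstPy3, h] at ih ⊢
        exact ih

theorem pvB_loop_none (xs : List (List (String × String))) :
    pvB_loop xs none = match pvFirstPy3 xs with
      | some t => pvCodeOf t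
      | none => pvA_loop2 xs := by
  induction xs with
  | nil => simp [pvB_loop, pvFirstPy3, pvA_loop2]
  | cons s rest ih =>
      by_cases h3 : ((PySem.Dict.mk s).get? "langSlug" == some "python3") = true
      · simp [pvB_loop, pvFirstPy3, h3, pvCodeOf]
      · simp only [Bool.not_eq_true] at h3
        by_cases hp : ((PySem.Dict.mk s).get? "langSlug" == some "python") = true
        · simp [pvB_loop, pvFirstPy3, pvA_loop2, h3, hp, pvB_loop_some, pvCodeOf]
        · simp only [Bool.not_eq_true] at hp
          simp [pvB_loop, pvFirstPy3, pvA_loop2, h3, hp] at ih ⊢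
          exact ih

-- ===== VERDICT (by name: the statement is the Claim_ definition above) =====
theorem get_python3_snippet_spec : Claim_equal_get_python3_snippet := by
  intro cs _ _
  unfold Spec_get_python3_snippet get_python3_snippet get_python3_snippet_alt
  rw [pvA_loop1_eq, pvB_loop_none]
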